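-- pv_equiv track=rewrite | github.com/charlespittman/everybodycodes | quest01/quest.py | count_potions
-- ===== SOURCE A (Python) =====
-- def group_monsters(monsters, size):
--     return [monsters[i : i + size] for i in range(0, len(monsters), size)]
--
-- def count_monsters(monsters):
--     monster_count = {}
--     for m in ["A", "B", "C", "D"]:
--         monster_count[m] = monsters.count(m)
--     return monster_count
--
-- def count_potions(monsters, group_size=1):
--     potions_per_monster = {
--         "A": 0,
--         "B": 1,
--         "C": 3,
--         "D": 5,
--     }
--
--     potions_needed = 0
--     groups = group_monsters(monsters, group_size)
--
--     for group in groups: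
--         monsters = count_monsters(group)
--         for monster in monsters:
--             potions_needed += monsters[monster] * potions_per_monster[monster]
--         if group_size == 2:
--             if "x" not in group:
--                 potions_needed += 2
--         if group_size == 3:
--             blanks = group.count("x")
--             if blanks == 0:
--                 potions_needed += 6
--             if blanks == 1:
--                 potions_needed += 2
--
--     return potions_needed
-- ===== SOURCE B (Python) =====
-- def count_potions(monsters, group_size=1):
--     cost = {"A": 0, "B": 1, "C": 3, "D": 5}
--     total = sum(cost.get(m, 0) for m in monsters)
--     if group_size in (2, 3):
--         for i in range(0, len(monsters), group_size):
--             blanks = monsters.count("x", i, i + group_size)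
--             if blanks == 0:
--                 total += 2 if group_size == 2 else 6
--             elif blanks == 1 and group_size == 3:
--                 total += 2
--     return total
-- ===== Notes on version B (the rewrite author's own statement) =====
-- stated objective: simpler
-- what changed: B replaces A's per-group pass that builds a 4-key count dict and iterates it with one flat cost-lookup sum over the whole string plus a bonus-only loop over group starts (run only when group_size is 2 or 3).
-- outside the precondition, e.g. on count_potions('AB', -1): A returns 0, B returns 1
import Mathlib
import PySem

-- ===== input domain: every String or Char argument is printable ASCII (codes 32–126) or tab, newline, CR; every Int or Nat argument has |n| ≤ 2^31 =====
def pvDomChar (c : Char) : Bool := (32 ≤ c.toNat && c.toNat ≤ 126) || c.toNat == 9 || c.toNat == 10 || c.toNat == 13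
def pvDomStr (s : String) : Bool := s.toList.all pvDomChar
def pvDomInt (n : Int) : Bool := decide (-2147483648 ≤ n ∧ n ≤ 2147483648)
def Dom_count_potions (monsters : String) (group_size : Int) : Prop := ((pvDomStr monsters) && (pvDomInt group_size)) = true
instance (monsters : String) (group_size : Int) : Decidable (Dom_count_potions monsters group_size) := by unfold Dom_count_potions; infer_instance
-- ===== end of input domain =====

-- B replaces A's per-group count-dict pass with one flat cost-lookup sum plus a bonus-only loop over group
-- starts; same cost, simpler decomposition. Equality is proved for group_size ≥ 1 (Pre_).

-- ===== PORT A =====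
def pvGroupMonsters (monsters : List Char) (size : Int) : List (List Char) :=
  (PySem.List.pyRange 0 (monsters.length : Int) size).map
    (fun i => PySem.List.slice monsters (some i) (some (i + size)))

def pvCountMonsters (monsters : List Char) : PySem.Dict String Int :=
  ["A", "B", "C", "D"].foldl
    (fun d m => d.insert m ((PySem.Chars.count monsters m.toList : Int))) PySem.Dict.empty

def count_potions (monsters : String) (group_size : Int) : Int :=
  let potions_per_monster : PySem.Dict String Int :=
    (((PySem.Dict.empty.insert "A" 0).insert "B" 1).insert "C" 3).insert "D" 5
  let groups := pvGroupMonsters monsters.toList group_size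
  groups.foldl
    (fun potions_needed group =>
      let mc := pvCountMonsters group
      -- 'for monster in monsters: potions_needed += monsters[monster] * potions_per_monster[monster]';
      -- every key of mc is a key of potions_per_monster, so the getD default is never used (Python's d[k])
      let potions_needed := mc.items.foldl
        (fun acc kv => acc + kv.2 * potions_per_monster.getD kv.1 0) potions_needed
      let potions_needed :=
        if group_size = 2 then
          if PySem.Chars.isIn ['x'] group then potions_needed else potions_needed + 2
        else potions_needed
      if group_size = 3 then
        let blanks := PySem.Chars.count group ['x']
        let potions_needed := if blanks = 0 then potions_needed + 6 else potions_needed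
        if blanks = 1 then potions_needed + 2 else potions_needed
      else potions_needed)
    0

-- ===== PORT B =====
def count_potions_alt (monsters : String) (group_size : Int) : Int :=
  let cost : PySem.Dict Char Int :=
    (((PySem.Dict.empty.insert 'A' 0).insert 'B' 1).insert 'C' 3).insert 'D' 5
  let cs := monsters.toList
  let total := cs.foldl (fun a m => a + cost.getD m 0) 0
  if group_size = 2 ∨ group_size = 3 then
    (PySem.List.pyRange 0 (cs.length : Int) group_size).foldl
      (fun total i =>
        -- monsters.count("x", i, i + group_size) = count of "x" in monsters[i:i+group_size] (exact)
        let blanks := PySem.Chars.count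
          (PySem.List.slice cs (some i) (some (i + group_size))) ['x']
        if blanks = 0 then total + (if group_size = 2 then 2 else 6)
        else if blanks = 1 ∧ group_size = 3 then total + 2
        else total)
      total
  else total

-- ===== PRECONDITION & SPEC =====
-- Pre_ restricts to positive group sizes, the natural domain of a chunk size: for group_size == 0 A raises
-- ValueError (range() step zero), and for negative group_size the grouping is empty/undefined, so A's 0 and
-- B's ungrouped base cost are equally accidental corner values.
def Pre_count_potions (monsters : String) (group_size : Int) : Prop := 1 ≤ group_size
instance (monsters : String) (group_size : Int) : Decidable (Pre_count_potions monsters group_size) := by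
  unfold Pre_count_potions; infer_instance
def pvWitness_count_potions : String × Int := ("ABCDxA", 2)

def Spec_count_potions (monsters : String) (group_size : Int) (out : Int) : Prop :=
  out = count_potions_alt monsters group_size
instance (monsters : String) (group_size : Int) (out : Int) : Decidable (Spec_count_potions monsters group_size out) := by
  unfold Spec_count_potions; infer_instance

-- ===== CLAIM (what is proved, stated in full; the proofs are below) =====
def Claim_equal_count_potions : Prop := ∀ (monsters : String) (group_size : Int), Dom_count_potions monsters group_size → Pre_count_potions monsters group_size → Spec_count_potions monsters group_size (count_potions monsters group_size)

-- ===== LEMMAS AND PROOFS =====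

-- counting a single character: PySem.Chars.count reduces to List.count
lemma pv_count_go_single (c : Char) : ∀ (s : List Char) (fuel acc : Nat), s.length ≤ fuel →
    PySem.Chars.count.go [c] fuel s acc = acc + s.count c := by
  intro s
  induction s with
  | nil => intro fuel acc _; cases fuel <;> simp [PySem.Chars.count.go]
  | cons h t ih =>
    intro fuel acc hf
    cases fuel with
    | zero => simp at hf
    | succ f =>
      have hf' : t.length ≤ f := by simpa using hf
      by_cases hc : c = h
      · subst hc
        simp only [PySem.Chars.count.go, List.isPrefixOf, BEq.rfl, Bool.true_and,
          List.isPrefixOf_nil_left, if_true, List.length_cons, List.drop_succ_cons,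
          List.drop_zero, List.count_cons, beq_self_eq_true]
        rw [show List.drop [].length t = t from rfl, ih f (acc + 1) hf']
        omega
      · have : ([c].isPrefixOf (h :: t)) = false := by
          simp [List.isPrefixOf, hc]
        simp only [PySem.Chars.count.go, this, Bool.false_eq_true, if_false]
        rw [ih f acc hf']
        simp [List.count_cons, Ne.symm hc, hc]

lemma pv_count_single (g : List Char) (c : Char) : PySem.Chars.count g [c] = g.count c := by
  simp [PySem.Chars.count, pv_count_go_single c g g.length 0 le_rfl]

-- per-group cost of A's count-dict pass / per-character cost of B's flat pass
def pvBase (g : List Char) : Int :=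
  (g.count 'B' : Int) + 3 * (g.count 'C' : Int) + 5 * (g.count 'D' : Int)

-- per-group bonus, common closed form of both loops
def pvBonus (gs : Int) (g : List Char) : Int :=
  if gs = 2 then (if g.count 'x' = 0 then 2 else 0)
  else if gs = 3 then (if g.count 'x' = 0 then 6 else if g.count 'x' = 1 then 2 else 0)
  else 0

lemma pv_items (g : List Char) : (pvCountMonsters g).items =
    [("A", (PySem.Chars.count g ['A'] : Int)), ("B", (PySem.Chars.count g ['B'] : Int)),
     ("C", (PySem.Chars.count g ['C'] : Int)), ("D", (PySem.Chars.count g ['D'] : Int))] := rfl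

lemma pv_inner (g : List Char) (acc : Int) :
    ((pvCountMonsters g).items.foldl
      (fun a kv => a + kv.2 * ((((PySem.Dict.empty.insert "A" 0).insert "B" (1:Int)).insert "C" 3).insert "D" 5).getD kv.1 0) acc)
    = acc + pvBase g := by
  have hA : ((((PySem.Dict.empty.insert "A" 0).insert "B" (1:Int)).insert "C" 3).insert "D" 5).getD "A" 0 = 0 := rfl
  have hB : ((((PySem.Dict.empty.insert "A" 0).insert "B" (1:Int)).insert "C" 3).insert "D" 5).getD "B" 0 = 1 := rfl
  have hC : ((((PySem.Dict.empty.insert "A" 0).insert "B" (1:Int)).insert "C" 3).insert "D" 5).getD "C" 0 = 3 := rfl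
  have hD : ((((PySem.Dict.empty.insert "A" 0).insert "B" (1:Int)).insert "C" 3).insert "D" 5).getD "D" 0 = 5 := rfl
  rw [pv_items]
  simp only [List.foldl_cons, List.foldl_nil]
  rw [hA, hB, hC, hD]
  simp only [pv_count_single, pvBase]
  ring

lemma pv_isIn_x (g : List Char) : PySem.Chars.isIn ['x'] g = true ↔ 'x' ∈ g := by
  rw [PySem.Chars.isIn_iff_infix]
  constructor
  · intro h; exact h.mem (by simp)
  · intro h
    obtain ⟨l1, l2, rfl⟩ := List.mem_iff_append.mp h
    exact ⟨l1, l2, by simp⟩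

lemma pv_cost_fold (g : List Char) (t : Int) :
    g.foldl (fun a m => a + ((((PySem.Dict.empty.insert 'A' 0).insert 'B' (1:Int)).insert 'C' 3).insert 'D' 5).getD m 0) t
    = t + pvBase g := by
  induction g generalizing t with
  | nil => simp [pvBase]
  | cons m g ih =>
    rw [List.foldl_cons, ih]
    have hcnt : ∀ c : Char, ((m :: g).count c : Int) = (if m = c then 1 else 0) + (g.count c : Int) := by
      intro c
      rw [List.count_cons]
      by_cases h : m = c <;> simp [h] <;> push_cast <;> ring
    simp only [pvBase, hcnt]
    simp only [PySem.Dict.getD_insert,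
      show (PySem.Dict.empty : PySem.Dict Char Int).getD m 0 = 0 from rfl]
    split_ifs <;> first | (push_cast; ring1) | (exfalso; simp_all)

lemma pv_pyRange_pos_nil (a b s : Int) (h : b ≤ a) (hs : 0 < s) :
    PySem.List.pyRange a b s = [] := by
  rw [PySem.List.pyRange_of_pos a b hs]
  simp [not_lt.mpr h]

lemma pv_pyRange_pos_cons (a b s : Int) (h : a < b) (hs : 0 < s) :
    PySem.List.pyRange a b s = a :: PySem.List.pyRange (a + s) b s := by
  rw [PySem.List.pyRange_of_pos a b hs, PySem.List.pyRange_of_pos (a+s) b hs]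
  have hq0 : 0 ≤ (b - a - 1) / s := Int.ediv_nonneg (by omega) (by omega)
  have key : ((b - a + s - 1) / s).toNat = (if a + s < b then ((b - (a+s) + s - 1) / s).toNat else 0) + 1 := by
    have h1 : (b - a + s - 1) / s = (b - a - 1) / s + 1 := by
      have := Int.add_mul_ediv_right (b - a - 1) 1 (show s ≠ 0 by omega)
      simpa [one_mul] using (by rw [show b - a + s - 1 = b - a - 1 + 1 * s by ring, this])
    by_cases h2 : a + s < b
    · rw [if_pos h2, h1]
      have : b - (a+s) + s - 1 = b - a - 1 := by ring
      rw [this]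
      omega
    · rw [if_neg h2, h1]
      have : (b - a - 1) / s = 0 := Int.ediv_eq_zero_of_lt (by omega) (by omega)
      omega
  rw [if_pos h, key, List.range_succ_eq_map, List.map_cons, List.map_map]
  congr 1
  · ring
  · apply List.map_congr_left
    intro k _
    simp [Function.comp]
    ring

lemma pv_chunks_flatten (s : Int) (hs : 1 ≤ s) (cs : List Char) :
    ∀ (k j : Nat), cs.length ≤ j + k →
      (((PySem.List.pyRange (j : Int) (cs.length : Int) s).map
        (fun i => PySem.List.slice cs (some i) (some (i + s)))).flatten) = cs.drop j := by
  intro k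
  induction k with
  | zero =>
    intro j hj
    rw [pv_pyRange_pos_nil _ _ _ (by exact_mod_cast (by omega : (cs.length : Int) ≤ (j : Int))) (by omega)]
    simp [List.drop_eq_nil_of_le (show cs.length ≤ j by omega)]
  | succ k ih =>
    intro j hj
    by_cases hjl : cs.length ≤ j
    · rw [pv_pyRange_pos_nil _ _ _ (by exact_mod_cast hjl) (by omega)]
      simp [List.drop_eq_nil_of_le hjl]
    · push_neg at hjl
      rw [pv_pyRange_pos_cons _ _ _ (by exact_mod_cast hjl) (by omega), List.map_cons, List.flatten_cons]
      have hsl : PySem.List.slice cs (some (j : Int)) (some ((j : Int) + s)) =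
          List.take s.toNat (List.drop j cs) := by
        rw [PySem.List.slice_toNat cs (by positivity) (by omega)]
        congr 1
        omega
      have hcast : (j : Int) + s = ((j + s.toNat : Nat) : Int) := by push_cast; omega
      rw [hsl, hcast, ih (j + s.toNat) (by omega)]
      rw [← List.drop_drop (i := s.toNat) (j := j)]
      exact List.take_append_drop _ _

lemma pv_sum_map_base (G : List (List Char)) : (G.map pvBase).sum = pvBase G.flatten := by
  induction G with
  | nil => simp [pvBase]
  | cons g G ih =>
    simp only [List.map_cons, List.sum_cons, List.flatten_cons, ih, pvBase, List.count_append]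
    push_cast
    ring

lemma pv_sum_base (cs : List Char) (gs : Int) (hgs : 1 ≤ gs) :
    ((pvGroupMonsters cs gs).map pvBase).sum = pvBase cs := by
  rw [pv_sum_map_base]
  have := pv_chunks_flatten gs hgs cs cs.length 0 (by omega)
  unfold pvGroupMonsters
  exact congrArg pvBase (by simpa using this)

-- A's per-group step in closed form
lemma pv_A_step (gs : Int) (g : List Char) (t : Int) :
    (let mc := pvCountMonsters g
     let pn := mc.items.foldl
       (fun acc kv => acc + kv.2 * ((((PySem.Dict.empty.insert "A" 0).insert "B" (1:Int)).insert "C" 3).insert "D" 5).getD kv.1 0) t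
     let pn2 :=
       if gs = 2 then
         if PySem.Chars.isIn ['x'] g then pn else pn + 2
       else pn
     if gs = 3 then
       let blanks := PySem.Chars.count g ['x']
       let pn3 := if blanks = 0 then pn2 + 6 else pn2
       if blanks = 1 then pn3 + 2 else pn3
     else pn2)
    = t + (pvBase g + pvBonus gs g) := by
  simp only [pv_inner, pv_count_single, pvBonus]
  by_cases h2 : gs = 2
  · have h3 : ¬ gs = 3 := by omega
    simp only [h2, if_true, h3, if_false, if_pos rfl, show ¬ (2:Int) = 3 by decide]
    by_cases hx : 'x' ∈ g
    · have hcz : ¬ g.count 'x' = 0 := by simpa [List.count_eq_zero] using hx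
      simp [pv_isIn_x, hx, hcz]
      try ring
    · have hcz : g.count 'x' = 0 := List.count_eq_zero.mpr hx
      simp [pv_isIn_x, hx, hcz]
      try ring
  · by_cases h3 : gs = 3
    · simp only [h3, show ¬ (3:Int) = 2 by decide, if_false, if_true, h2, if_pos rfl]
      by_cases hb0 : g.count 'x' = 0
      · simp [hb0]
        try ring
      · by_cases hb1 : g.count 'x' = 1
        · simp [hb0, hb1]
          try ring
        · simp [hb0, hb1]
          try ring
    · simp [h2, h3]
      try ring

lemma pv_A_fold (gs : Int) (G : List (List Char)) (t : Int) :
    G.foldl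
      (fun potions_needed group =>
        let mc := pvCountMonsters group
        let potions_needed := mc.items.foldl
          (fun acc kv => acc + kv.2 * ((((PySem.Dict.empty.insert "A" 0).insert "B" (1:Int)).insert "C" 3).insert "D" 5).getD kv.1 0) potions_needed
        let potions_needed :=
          if gs = 2 then
            if PySem.Chars.isIn ['x'] group then potions_needed else potions_needed + 2
          else potions_needed
        if gs = 3 then
          let blanks := PySem.Chars.count group ['x']
          let potions_needed := if blanks = 0 then potions_needed + 6 else potions_needed
          if blanks = 1 then potions_needed + 2 else potions_needed
        else potions_needed)
      t
    = t + ((G.map (fun g => pvBase g + pvBonus gs g)).sum) := by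
  induction G generalizing t with
  | nil => simp
  | cons g G ih =>
    rw [List.foldl_cons]
    rw [show (let mc := pvCountMonsters g
        let potions_needed := mc.items.foldl
          (fun acc kv => acc + kv.2 * ((((PySem.Dict.empty.insert "A" 0).insert "B" (1:Int)).insert "C" 3).insert "D" 5).getD kv.1 0) t
        let potions_needed :=
          if gs = 2 then
            if PySem.Chars.isIn ['x'] g then potions_needed else potions_needed + 2
          else potions_needed
        if gs = 3 then
          let blanks := PySem.Chars.count g ['x']
          let potions_needed := if blanks = 0 then potions_needed + 6 else potions_needed
          if blanks = 1 then potions_needed + 2 else potions_needed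
        else potions_needed) = t + (pvBase g + pvBonus gs g) from pv_A_step gs g t]
    rw [ih]
    simp [List.sum_cons]
    ring

-- B's bonus step in closed form
lemma pv_B_step (gs : Int) (cs : List Char) (i t : Int) (hgs : gs = 2 ∨ gs = 3) :
    (let blanks := PySem.Chars.count (PySem.List.slice cs (some i) (some (i + gs))) ['x']
     if blanks = 0 then t + (if gs = 2 then 2 else 6)
     else if blanks = 1 ∧ gs = 3 then t + 2
     else t)
    = t + pvBonus gs (PySem.List.slice cs (some i) (some (i + gs))) := by
  set g := PySem.List.slice cs (some i) (some (i + gs)) with hg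
  simp only [pv_count_single, pvBonus]
  rcases hgs with h | h
  · subst h
    simp only [if_pos rfl, show ¬ ((2:Int) = 3) by decide, and_false, if_false]
    by_cases hb : g.count 'x' = 0 <;> simp [hb]
  · subst h
    simp only [show ¬ ((3:Int) = 2) by decide, if_false, if_pos rfl, and_true]
    by_cases hb0 : g.count 'x' = 0
    · simp [hb0]
    · by_cases hb1 : g.count 'x' = 1 <;> simp [hb0, hb1]

lemma pv_B_fold (gs : Int) (cs : List Char) (t : Int) (hgs : gs = 2 ∨ gs = 3) :
    (PySem.List.pyRange 0 (cs.length : Int) gs).foldl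
      (fun total i =>
        let blanks := PySem.Chars.count (PySem.List.slice cs (some i) (some (i + gs))) ['x']
        if blanks = 0 then total + (if gs = 2 then 2 else 6)
        else if blanks = 1 ∧ gs = 3 then total + 2
        else total)
      t
    = t + ((pvGroupMonsters cs gs).map (pvBonus gs)).sum := by
  have hstep : (fun (total i : Int) =>
        let blanks := PySem.Chars.count (PySem.List.slice cs (some i) (some (i + gs))) ['x']
        if blanks = 0 then total + (if gs = 2 then 2 else 6)
        else if blanks = 1 ∧ gs = 3 then total + 2
        else total)
      = fun total i => total + pvBonus gs (PySem.List.slice cs (some i) (some (i + gs))) := by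
    funext total i
    exact pv_B_step gs cs i total hgs
  rw [hstep, PySem.List.foldl_add]
  unfold pvGroupMonsters
  rw [List.map_map]
  rfl

-- ===== VERDICT (by name: the statement is the Claim_ definition above) =====
theorem count_potions_spec : Claim_equal_count_potions := by
  intro monsters gs _ hpre
  unfold Pre_count_potions at hpre
  unfold Spec_count_potions count_potions count_potions_alt
  simp only []
  rw [pv_A_fold gs (pvGroupMonsters monsters.toList gs) 0, pv_cost_fold]
  have hsplit : ((pvGroupMonsters monsters.toList gs).map (fun g => pvBase g + pvBonus gs g)).sum
      = ((pvGroupMonsters monsters.toList gs).map pvBase).sum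
        + ((pvGroupMonsters monsters.toList gs).map (pvBonus gs)).sum := by
    induction pvGroupMonsters monsters.toList gs with
    | nil => simp
    | cons g G ih => simp [ih]; ring
  by_cases hgs : gs = 2 ∨ gs = 3
  · rw [if_pos hgs, pv_B_fold gs monsters.toList (0 + pvBase monsters.toList) hgs]
    rw [hsplit, pv_sum_base monsters.toList gs hpre]
    ring
  · rw [if_neg hgs]
    have hz : ∀ g ∈ pvGroupMonsters monsters.toList gs, pvBonus gs g = 0 := by
      intro g _
      unfold pvBonus
      push_neg at hgs
      simp [hgs.1, hgs.2]
    rw [hsplit, pv_sum_base monsters.toList gs hpre]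
    have : ((pvGroupMonsters monsters.toList gs).map (pvBonus gs)).sum = 0 := by
      rw [List.sum_eq_zero]
      intro x hx
      obtain ⟨g, hg, rfl⟩ := List.mem_map.mp hx
      exact hz g hg
    rw [this]
    ring
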